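-- pv_equiv track=rewrite | github.com/NairiAreg/MDSGene_backend | main.py | generate_full_feature_array
-- ===== SOURCE A (Python) =====
-- from typing import List, Dict
--
-- def generate_full_feature_array(input_data: Dict[str, int], all_features: List[str], default_value: int) -> List[int]:
--     n = len(all_features)
--     # Первые 5 элементов - default_value, остальные - 3
--     feature_array = [default_value] * min(5, n) + [3] * max(0, n - 5)
--     #
--     # feature_array = [default_value] * len(all_features)
--
--     for feature, value in input_data.items():
--         normalized_feature = feature.replace(" ", "_")  # Replace spaces with underscores
--
--         # Match feature by prefix in all_features
--         matching_indices = [i for i, f in enumerate(all_features) if f.startswith(normalized_feature)]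
--
--         for index in matching_indices:
--             feature_array[index] = value
--
--     return feature_array
-- ===== SOURCE B (Python) =====
-- def generate_full_feature_array(input_data, all_features, default_value):
--     # One pass over all_features: each slot takes the value of the LAST input
--     # entry whose normalized key is a prefix of the feature, else its default.
--     norm = [(k.replace(" ", "_"), v) for k, v in input_data.items()]
--     out = []
--     for i, f in enumerate(all_features):
--         val = default_value if i < 5 else 3
--         for k, v in reversed(norm):
--             if f.startswith(k):
--                 val = v
--                 break
--         out.append(val)
--     return out
-- ===== Notes on version B (the rewrite author's own statement) =====
-- stated objective: alternative
-- what changed: Instead of mutating a preallocated array by folding assignments over the input dict (last write wins), B builds the output in one map over all_features, giving each slot the value of the LAST input entry whose normalized key is a prefix, else its positional default; no array mutation, loops inverted.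
import Mathlib
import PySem

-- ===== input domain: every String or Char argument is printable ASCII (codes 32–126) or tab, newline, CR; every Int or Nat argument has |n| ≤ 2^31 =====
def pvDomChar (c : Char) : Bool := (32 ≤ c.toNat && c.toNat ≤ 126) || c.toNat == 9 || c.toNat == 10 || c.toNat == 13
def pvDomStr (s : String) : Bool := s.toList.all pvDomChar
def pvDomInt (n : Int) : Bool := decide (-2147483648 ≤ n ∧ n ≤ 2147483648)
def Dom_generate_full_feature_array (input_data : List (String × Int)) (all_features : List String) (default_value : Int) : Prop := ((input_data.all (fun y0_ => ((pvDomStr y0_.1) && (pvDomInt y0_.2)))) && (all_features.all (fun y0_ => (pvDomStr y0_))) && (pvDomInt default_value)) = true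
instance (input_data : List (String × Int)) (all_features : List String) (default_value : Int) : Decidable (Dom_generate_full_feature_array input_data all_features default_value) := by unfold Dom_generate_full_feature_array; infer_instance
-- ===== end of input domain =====

-- B replaces A's fold of in-place index assignments over the input dict by a single map over
-- all_features that picks each slot's value as the last matching input entry (alternative decomposition, same cost).


-- ===== PORT A =====
-- one dict item: compute the matching indices, then assign value at each
-- (indices come from enumerate, hence nonnegative: .toNat is exact here)
def pvApplyA (all_features : List String) (arr : List Int) (kv : String × Int) : List Int :=
  let normalized_feature := PySem.Str.replace kv.1 " " "_"
  let matching_indices := ((PySem.List.enumerate all_features).filter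
      (fun p => PySem.Str.startswith p.2 normalized_feature)).map (·.1)
  matching_indices.foldl (fun a index => a.set index.toNat kv.2) arr

def generate_full_feature_array (input_data : List (String × Int)) (all_features : List String) (default_value : Int) : List Int :=
  let n := all_features.length
  let feature_array := List.replicate (min 5 n) default_value ++ List.replicate (n - 5) 3
  ((PySem.Dict.ofList input_data).items).foldl (pvApplyA all_features) feature_array

-- ===== PORT B =====
-- scan reversed(norm), first hit wins (= Python's loop with break)
def pvLastMatch (norm : List (String × Int)) (f : String) (dflt : Int) : Int :=
  match norm.reverse.find? (fun kv => PySem.Str.startswith f kv.1) with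
  | some kv => kv.2
  | none => dflt

def generate_full_feature_array_alt (input_data : List (String × Int)) (all_features : List String) (default_value : Int) : List Int :=
  let norm := ((PySem.Dict.ofList input_data).items).map
      (fun kv => (PySem.Str.replace kv.1 " " "_", kv.2))
  (PySem.List.enumerate all_features).map
      (fun p => pvLastMatch norm p.2 (if p.1 < 5 then default_value else 3))

-- ===== PRECONDITION & SPEC =====
def Spec_generate_full_feature_array (input_data : List (String × Int)) (all_features : List String) (default_value : Int) (out : List Int) : Prop := out = generate_full_feature_array_alt input_data all_features default_value
instance (input_data : List (String × Int)) (all_features : List String) (default_value : Int) (out : List Int) : Decidable (Spec_generate_full_feature_array input_data all_features default_value out) := by unfold Spec_generate_full_feature_array; infer_instance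

-- ===== CLAIM (what is proved, stated in full; the proofs are below) =====
def Claim_equal_generate_full_feature_array : Prop := ∀ (input_data : List (String × Int)) (all_features : List String) (default_value : Int), Dom_generate_full_feature_array input_data all_features default_value → Spec_generate_full_feature_array input_data all_features default_value (generate_full_feature_array input_data all_features default_value)

-- ===== LEMMAS AND PROOFS =====

theorem pvApplyA_eq (feats : List String) (arr : List Int) (kv : String × Int) :
    pvApplyA feats arr kv =
      (((PySem.List.enumerate feats).filter
          (fun p => PySem.Str.startswith p.2 (PySem.Str.replace kv.1 " " "_"))).map (·.1)).foldl
        (fun a index => a.set index.toNat kv.2) arr := rfl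

theorem foldl_set_length (idxs : List Int) (v : Int) (arr : List Int) :
    (idxs.foldl (fun a index => a.set index.toNat v) arr).length = arr.length := by
  induction idxs generalizing arr with
  | nil => rfl
  | cons j t ih => rw [List.foldl_cons, ih, List.length_set]

theorem pvApplyA_length (feats : List String) (arr : List Int) (kv : String × Int) :
    (pvApplyA feats arr kv).length = arr.length := by
  rw [pvApplyA_eq, foldl_set_length]

theorem foldlA_length (feats : List String) (L : List (String × Int)) (arr : List Int) :
    (L.foldl (pvApplyA feats) arr).length = arr.length := by
  induction L generalizing arr with
  | nil => rfl
  | cons kv t ih => rw [List.foldl_cons, ih, pvApplyA_length]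

-- fold of identical assignments at a list of (nonnegative) indices, read at i
theorem foldl_set_getElem (idxs : List Int) (hnn : ∀ j ∈ idxs, 0 ≤ j) (v : Int)
    (arr : List Int) (i : Nat) (hi : i < arr.length)
    (hlen : i < (idxs.foldl (fun a index => a.set index.toNat v) arr).length) :
    (idxs.foldl (fun a index => a.set index.toNat v) arr)[i] =
      if (i : Int) ∈ idxs then v else arr[i] := by
  induction idxs generalizing arr with
  | nil => simp
  | cons j t ih =>
    have hj : 0 ≤ j := hnn j (by simp)
    simp only [List.foldl_cons] at hlen ⊢
    rw [ih (fun x hx => hnn x (List.mem_cons_of_mem _ hx)) (arr.set j.toNat v)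
        (by simpa using hi) hlen]
    have hset : (arr.set j.toNat v)[i]'(by simpa using hi) =
        if (i : Int) = j then v else arr[i] := by
      rw [List.getElem_set]
      by_cases h : (i : Int) = j
      · rw [if_pos (by omega), if_pos h]
      · rw [if_neg (by omega), if_neg h]
    rw [hset]
    by_cases hmem : (i : Int) ∈ t
    · simp [hmem]
    · by_cases hji : (i : Int) = j
      · simp [hji]
      · simp [hmem, hji, List.mem_cons]

-- membership in A's matching_indices list, at a valid index i
theorem mem_matching_iff (feats : List String) (nf : String) (i : Nat) (hi : i < feats.length) :
    ((i : Int) ∈ ((PySem.List.enumerate feats).filter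
        (fun p => PySem.Str.startswith p.2 nf)).map (·.1)) ↔
      PySem.Str.startswith feats[i] nf = true := by
  constructor
  · rintro h
    simp only [List.mem_map, List.mem_filter] at h
    obtain ⟨p, ⟨hp, hsw⟩, hfst⟩ := h
    rw [PySem.List.mem_enumerate_iff] at hp
    obtain ⟨k, hk, rfl⟩ := hp
    simp only [zero_add] at hfst hsw
    have : k = i := by exact_mod_cast hfst
    subst this; exact hsw
  · intro h
    simp only [List.mem_map, List.mem_filter]
    refine ⟨((i : Int), feats[i]), ⟨?_, h⟩, rfl⟩
    rw [PySem.List.mem_enumerate_iff]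
    exact ⟨i, hi, by simp⟩

theorem matching_nonneg (feats : List String) (nf : String) :
    ∀ j ∈ ((PySem.List.enumerate feats).filter
        (fun p => PySem.Str.startswith p.2 nf)).map (·.1), 0 ≤ j := by
  intro j hj
  simp only [List.mem_map, List.mem_filter] at hj
  obtain ⟨p, ⟨hp, _⟩, hfst⟩ := hj
  rw [PySem.List.mem_enumerate_iff] at hp
  obtain ⟨k, hk, rfl⟩ := hp
  simp only [zero_add] at hfst
  omega

-- the heart: after folding A's per-item assignment over L, slot i holds the value of the
-- last matching entry of L (read through B's pvLastMatch on the normalized copy of L),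
-- defaulting to what arr held there
theorem foldlA_getElem (feats : List String) (L : List (String × Int)) (arr : List Int)
    (hlen : arr.length = feats.length) (i : Nat) (hi : i < feats.length)
    (h1 : i < (L.foldl (pvApplyA feats) arr).length) (h2 : i < arr.length) :
    (L.foldl (pvApplyA feats) arr)[i] =
      pvLastMatch (L.map (fun kv => (PySem.Str.replace kv.1 " " "_", kv.2))) feats[i] arr[i] := by
  induction L using List.reverseRecOn generalizing arr with
  | nil => simp [pvLastMatch]
  | append_singleton t kv ih =>
    have h2' : i < (t.foldl (pvApplyA feats) arr).length := by
      rw [foldlA_length]; omega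
    simp only [List.foldl_append, List.foldl_cons, List.foldl_nil, pvApplyA_eq]
    rw [foldl_set_getElem _ (matching_nonneg feats _) kv.2 _ i h2'
          (by rw [foldl_set_length, foldlA_length]; omega)]
    simp only [mem_matching_iff feats _ i hi]
    rw [ih arr hlen h2' h2]
    unfold pvLastMatch
    rw [List.map_append, List.reverse_append]
    simp only [List.map_cons, List.map_nil, List.reverse_cons, List.reverse_nil,
      List.nil_append, List.cons_append, List.find?_cons]
    by_cases hsw : PySem.Chars.startswith feats[i].toList
        (PySem.Chars.replace kv.1.toList [' '] ['_']) = true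
    · simp [hsw]
    · simp [hsw]

-- the initial array holds the positional defaults
theorem base_getElem (n : Nat) (dv : Int) (i : Nat)
    (hi : i < (List.replicate (min 5 n) dv ++ List.replicate (n - 5) 3).length) :
    (List.replicate (min 5 n) dv ++ List.replicate (n - 5) 3)[i] =
      if (i : Int) < 5 then dv else 3 := by
  have hl : (List.replicate (min 5 n) dv ++ List.replicate (n - 5) 3).length = n := by
    simp; omega
  by_cases h5 : i < 5
  · have hlt : i < (List.replicate (min 5 n) dv).length := by simp; omega
    rw [List.getElem_append_left hlt, List.getElem_replicate, if_pos (by exact_mod_cast h5)]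
  · have hge : (List.replicate (min 5 n) dv).length ≤ i := by simp; omega
    rw [List.getElem_append_right hge, List.getElem_replicate, if_neg (by exact_mod_cast h5)]

-- ===== VERDICT (by name: the statement is the Claim_ definition above) =====
theorem generate_full_feature_array_spec : Claim_equal_generate_full_feature_array := by
  intro input_data all_features default_value _
  show _ = _
  unfold generate_full_feature_array generate_full_feature_array_alt
  simp only []
  generalize (PySem.Dict.ofList input_data).items = L
  have hbl : (List.replicate (min 5 all_features.length) default_value ++
      List.replicate (all_features.length - 5) 3).length = all_features.length := by
    simp; omega
  apply List.ext_getElem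
  · rw [foldlA_length, hbl, List.length_map, PySem.List.length_enumerate]
  · intro i h1 h2
    have hi : i < all_features.length := by rw [foldlA_length, hbl] at h1; exact h1
    rw [foldlA_getElem all_features L _ hbl i hi h1 (by omega),
        base_getElem all_features.length default_value i (by omega),
        List.getElem_map, PySem.List.getElem_enumerate]
    simp
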